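-- pv_equiv track=rewrite | github.com/Mitche-44/Python-demo | quiz5.py | solution
-- ===== SOURCE A (Python) =====
-- def solution(S):
--     total_x = S.count('x')
--     total_y = S.count('y')
--
--     left_x = left_y = 0
--     count = 0
--
--     for i in range(1, len(S)):
--         if S[i - 1] == 'x':
--             left_x += 1
--         elif S[i - 1] == 'y':
--             left_y += 1
--
--         right_x = total_x - left_x
--         right_y = total_y - left_y
--
--         if left_x == left_y or right_x == right_y:
--             count += 1
--
--     return count
-- ===== SOURCE B (Python) =====
-- def solution(S):
--     total = S.count('x') - S.count('y')
--     freq = {}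
--     d = 0
--     for ch in S[:-1]:
--         if ch == 'x':
--             d += 1
--         elif ch == 'y':
--             d -= 1
--         freq[d] = freq.get(d, 0) + 1
--     if total == 0:
--         return freq.get(0, 0)
--     return freq.get(0, 0) + freq.get(total, 0)
-- ===== Notes on version B (the rewrite author's own statement) =====
-- stated objective: alternative
-- what changed: A tests the balance condition at every split position with running left/right x- and y-counters; B instead builds a frequency dictionary of the prefix balances over S[:-1] and obtains the answer with two dictionary lookups, freq[0] plus freq[total] (only freq[0] when total == 0), so the per-position or-test disappears. (constant-factor win: the hot loop does one dict update instead of two counter branches plus the two-sided comparison at every split).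
import Mathlib
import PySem

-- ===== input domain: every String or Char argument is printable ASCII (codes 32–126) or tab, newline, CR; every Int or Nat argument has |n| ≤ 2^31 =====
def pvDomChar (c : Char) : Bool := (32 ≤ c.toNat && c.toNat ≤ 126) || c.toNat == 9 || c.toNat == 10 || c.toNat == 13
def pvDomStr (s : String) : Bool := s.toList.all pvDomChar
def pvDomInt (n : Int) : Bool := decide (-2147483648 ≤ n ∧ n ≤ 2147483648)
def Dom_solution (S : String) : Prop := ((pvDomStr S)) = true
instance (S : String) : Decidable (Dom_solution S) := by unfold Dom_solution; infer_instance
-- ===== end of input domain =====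

-- B replaces A's per-split balance test by a frequency dictionary of the prefix balances of
-- S[:-1]; the answer is freq[0] + freq[total] (just freq[0] when total == 0). Objective:
-- alternative decomposition, same O(n) cost.

-- ===== PORT A =====
def solution (S : String) : Int :=
  let totalX : Int := PySem.Str.count S "x"
  let totalY : Int := PySem.Str.count S "y"
  let st := (PySem.List.pyRange 1 (PySem.Str.len S)).foldl
    (fun (st : Int × Int × Int) i =>
      let ch := PySem.List.pyGetD S.toList (i - 1) ' '   -- S[i-1]; 1 ≤ i < len(S), always in range
      let lx := if ch = 'x' then st.1 + 1 else st.1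
      let ly := if ch ≠ 'x' ∧ ch = 'y' then st.2.1 + 1 else st.2.1
      let rx := totalX - lx
      let ry := totalY - ly
      (lx, ly, if lx = ly ∨ rx = ry then st.2.2 + 1 else st.2.2))
    (0, 0, 0)
  st.2.2

-- ===== PORT B =====
def solution_alt (S : String) : Int :=
  let total : Int := (PySem.Str.count S "x" : Int) - (PySem.Str.count S "y" : Int)
  let st := (PySem.List.slice S.toList none (some (-1))).foldl
    (fun (st : Int × PySem.Dict Int Int) ch =>
      let d := if ch = 'x' then st.1 + 1 else if ch = 'y' then st.1 - 1 else st.1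
      (d, st.2.insert d (st.2.getD d 0 + 1)))
    (0, PySem.Dict.empty)
  let freq := st.2
  if total = 0 then freq.getD 0 0
  else freq.getD 0 0 + freq.getD total 0

-- ===== PRECONDITION & SPEC =====
def Spec_solution (S : String) (out : Int) : Prop := out = solution_alt S
instance (S : String) (out : Int) : Decidable (Spec_solution S out) := by unfold Spec_solution; infer_instance

-- ===== CLAIM (what is proved, stated in full; the proofs are below) =====
def Claim_equal_solution : Prop := ∀ (S : String), Dom_solution S → Spec_solution S (solution S)

-- ===== LEMMAS AND PROOFS =====

-- per-character balance update (shared reference point of both proofs)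
def upd (d : Int) (ch : Char) : Int :=
  if ch = 'x' then d + 1 else if ch = 'y' then d - 1 else d

-- reference count: over the balances of the nonempty prefixes of l (starting from balance d),
-- how many are 0 or tot
def spec (tot : Int) : Int → List Char → Int
  | _, [] => 0
  | d, ch :: t =>
    (if upd d ch = 0 ∨ upd d ch = tot then 1 else 0) + spec tot (upd d ch) t

-- the list of prefix balances
def prefs : Int → List Char → List Int
  | _, [] => []
  | d, ch :: t => upd d ch :: prefs (upd d ch) t

-- B's dict-building loop over characters equals the counting loop over the balance list
theorem B_dict : ∀ (L : List Char) (d : Int) (acc : PySem.Dict Int Int),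
    (L.foldl
      (fun (st : Int × PySem.Dict Int Int) ch =>
        let d := if ch = 'x' then st.1 + 1 else if ch = 'y' then st.1 - 1 else st.1
        (d, st.2.insert d (st.2.getD d 0 + 1)))
      (d, acc)).2
    = (prefs d L).foldl (fun dd x => dd.insert x (dd.getD x 0 + 1)) acc := by
  intro L
  induction L with
  | nil => intro d acc; simp [prefs]
  | cons ch t ih =>
    intro d acc
    simp only [List.foldl_cons, prefs]
    exact ih (upd d ch) _

-- the reference count is the two counter lookups
theorem spec_counts (tot : Int) : ∀ (L : List Char) (d : Int),
    spec tot d L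
      = if tot = 0 then ((prefs d L).count 0 : Int)
        else ((prefs d L).count 0 : Int) + ((prefs d L).count tot : Int) := by
  intro L
  induction L with
  | nil => intro d; simp [spec, prefs]
  | cons ch t ih =>
    intro d
    simp only [spec, prefs, List.count_cons]
    rw [ih]
    by_cases h0 : tot = 0
    · subst h0
      by_cases hu : upd d ch = 0 <;> simp [hu] <;> push_cast <;> ring
    · have h0' : ¬((0:Int) = tot) := fun h => h0 h.symm
      by_cases hu0 : upd d ch = 0 <;> by_cases hut : upd d ch = tot <;>
        simp [h0, h0', hu0, hut] <;> push_cast <;> ring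

-- A's loop, from a split of the string into the processed prefix and the remaining suffix:
-- the counter advances by the reference count over the suffix (minus its last character)
theorem A_loop (tX tY : Int) (L : List Char) :
    ∀ (suf pre : List Char) (lx ly c : Int), L = pre ++ suf →
      ((PySem.List.pyRange ((pre.length : Int) + 1) (L.length : Int)).foldl
        (fun (st : Int × Int × Int) i =>
          let ch := PySem.List.pyGetD L (i - 1) ' '
          let lx := if ch = 'x' then st.1 + 1 else st.1
          let ly := if ch ≠ 'x' ∧ ch = 'y' then st.2.1 + 1 else st.2.1
          let rx := tX - lx
          let ry := tY - ly
          (lx, ly, if lx = ly ∨ rx = ry then st.2.2 + 1 else st.2.2))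
        (lx, ly, c)).2.2
      = c + spec (tX - tY) (lx - ly) suf.dropLast := by
  intro suf
  induction suf with
  | nil =>
    intro pre lx ly c hL
    rw [PySem.List.pyRange_one_eq_nil (by subst hL; simp)]
    simp [spec]
  | cons ch t ih =>
    intro pre lx ly c hL
    cases t with
    | nil =>
      rw [PySem.List.pyRange_one_eq_nil (by rw [hL]; simp)]
      simp [spec]
    | cons c' t' =>
      have hlt : (pre.length : Int) + 1 < (L.length : Int) := by
        rw [hL]; simp only [List.length_append, List.length_cons]; push_cast; omega
      rw [PySem.List.pyRange_one_cons hlt]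
      simp only [List.foldl_cons]
      have hget : PySem.List.pyGetD L ((pre.length : Int) + 1 - 1) ' ' = ch := by
        have h1 : (pre.length : Int) + 1 - 1 = (pre.length : Int) := by ring
        rw [h1, PySem.List.pyGetD_natCast, hL]
        simp [List.getD]
      rw [hget]
      set lx' : Int := if ch = 'x' then lx + 1 else lx with hlx'
      set ly' : Int := if ch ≠ 'x' ∧ ch = 'y' then ly + 1 else ly with hly'
      have hupd : lx' - ly' = upd (lx - ly) ch := by
        rw [hlx', hly']
        by_cases hx : ch = 'x' <;> by_cases hy : ch = 'y' <;> simp [upd, hx, hy] <;> omega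
      have hcond : (lx' = ly' ∨ tX - lx' = tY - ly')
          ↔ (upd (lx - ly) ch = 0 ∨ upd (lx - ly) ch = tX - tY) := by
        rw [← hupd]; omega
      have hstep := ih (pre ++ [ch]) lx' ly'
        (if lx' = ly' ∨ tX - lx' = tY - ly' then c + 1 else c)
        (by simpa using hL)
      have harg : ((pre ++ [ch]).length : Int) + 1 = (pre.length : Int) + 1 + 1 := by simp
      rw [harg, hupd] at hstep
      rw [hstep]
      simp only [List.dropLast_cons₂, spec]
      by_cases hp : upd (lx - ly) ch = 0 ∨ upd (lx - ly) ch = tX - tY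
      · rw [if_pos (hcond.mpr hp), if_pos hp]; ring
      · rw [if_neg (fun h => hp (hcond.mp h)), if_neg hp]; ring

-- ===== VERDICT (by name: the statement is the Claim_ definition above) =====
theorem solution_spec : Claim_equal_solution := by
  intro S _
  unfold Spec_solution solution solution_alt
  simp only [PySem.List.slice_to_neg_one]
  rw [B_dict S.toList.dropLast 0 PySem.Dict.empty,
      PySem.Dict.foldl_insert_getD_add_one_eq_counter]
  have hA := A_loop (PySem.Str.count S "x") (PySem.Str.count S "y") S.toList S.toList [] 0 0 0
    (by simp)
  simp only [List.length_nil, Nat.cast_zero, zero_add, sub_zero] at hA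
  rw [show PySem.Str.len S = (S.toList.length : Int) from by simp [PySem.Str.len_eq]]
  rw [hA, spec_counts]
  simp [PySem.Dict.getD_counter]
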